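-- pv_equiv track=rewrite | github.com/Nifrec/snakes_spn | spn_case_study/run_grid_search.py | get_all_combos
-- ===== SOURCE A (Python) =====
-- from typing import TypeVar, Dict, Sequence, List, Iterator
--
-- KeyType = TypeVar("KeyType")
--
-- ValueToCombine = TypeVar("ValueToCombine")
--
-- def get_all_combos(all_values: Dict[KeyType, Sequence[ValueToCombine]]
--                    ) -> List[Dict[KeyType, ValueToCombine]]:
--     """
--     Given a dictionary mapping to sequences of values,
--     return a dictionary mapping to one value of the sequence,
--     for each possible combination of choices.
--
--     @param all_values: dictionary mapping keys to a sequence of choices.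
--     @type all_values: Dict[KeyType, Sequence[ValueToCombine]]
--
--     @return List[Dict[KeyType, ValueToCombine]]: sequence containing
--         a dictionary for each specific possible combination of choices.
--         Return a list of an empty dictionary if `all_values` is empty.
--     """
--     if len(all_values) == 0:
--         return [dict()]
--
--     (key, values) = all_values.popitem()
--     output = []
--     for value in values:
--         new_choice_combo = {key: value}
--         other_combos = get_all_combos(all_values.copy())
--         for other_combo in other_combos:
--             other_combo.update(new_choice_combo)
--             output.append(other_combo)
--     return output
-- ===== SOURCE B (Python) =====
-- def get_all_combos(all_values):
--     """Iterative one-pass build: fold the keys front-to-back, extending every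
--     partial combo with each choice for the current key.
--
--     Unlike the original, this does not mutate `all_values` (the original pops
--     its last item); the return value is identical.
--     """
--     combos = [dict()]
--     for key, values in all_values.items():
--         combos = [{**combo, key: value} for value in values for combo in combos]
--     return combos
-- ===== Notes on version B (the rewrite author's own statement) =====
-- stated objective: simpler
-- what changed: Replaces A's pop-last-item recursion (which re-runs the whole recursive call once per value of the popped key and mutates the input dict) with a single non-mutating front-to-back fold that extends every partial combo with each choice for the current key.
import Mathlib
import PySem

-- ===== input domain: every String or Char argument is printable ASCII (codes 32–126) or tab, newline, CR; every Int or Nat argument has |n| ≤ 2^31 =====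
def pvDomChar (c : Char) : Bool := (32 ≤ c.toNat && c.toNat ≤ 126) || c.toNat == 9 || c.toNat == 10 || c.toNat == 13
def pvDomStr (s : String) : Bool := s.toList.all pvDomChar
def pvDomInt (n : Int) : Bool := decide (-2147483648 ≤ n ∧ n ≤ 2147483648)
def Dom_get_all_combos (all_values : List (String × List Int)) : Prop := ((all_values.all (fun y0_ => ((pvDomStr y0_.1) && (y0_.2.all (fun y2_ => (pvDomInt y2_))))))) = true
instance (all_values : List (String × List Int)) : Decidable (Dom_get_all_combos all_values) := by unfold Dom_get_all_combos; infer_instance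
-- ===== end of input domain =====

-- B replaces A's pop-last-and-recurse (recomputing the sub-result for every value) by a
-- single front-to-back fold extending every partial combo; return value identical
-- (A also pops the last item from the caller's dict, B does not mutate its argument).

-- dict update with one key {key: value}: overwrite in place if present, else append
-- (exact Python dict semantics; used by both ports, as both Pythons do this update)
def pyDictSet (d : List (String × Int)) (k : String) (v : Int) : List (String × Int) :=
  if d.any (fun p => p.1 == k) then d.map (fun p => if p.1 == k then (k, v) else p)
  else d ++ [(k, v)]

-- ===== PORT A =====
def get_all_combos (all_values : List (String × List Int)) : List (List (String × Int)) :=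
  match _h : all_values.getLast? with
  | none => [[]]                              -- len(all_values) == 0
  | some (key, values) =>                     -- (key, values) = all_values.popitem()
      let rest := all_values.dropLast
      values.foldl (fun output value =>
        -- other_combos = get_all_combos(all_values.copy()); recomputed inside the loop as in A
        output ++ (get_all_combos rest).map (fun other_combo => pyDictSet other_combo key value)) []
termination_by all_values.length
decreasing_by
  have hne : all_values ≠ [] := by
    intro he; subst he; simp at _h
  have : 0 < all_values.length := List.length_pos_iff.mpr hne
  simp [List.length_dropLast]; omega

-- ===== PORT B =====
def get_all_combos_alt (all_values : List (String × List Int)) : List (List (String × Int)) :=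
  all_values.foldl (fun combos kv =>
    kv.2.foldl (fun acc value => acc ++ combos.map (fun c => pyDictSet c kv.1 value)) []) [[]]

-- ===== PRECONDITION & SPEC =====
def Spec_get_all_combos (all_values : List (String × List Int)) (out : List (List (String × Int))) : Prop := out = get_all_combos_alt all_values
instance (all_values : List (String × List Int)) (out : List (List (String × Int))) : Decidable (Spec_get_all_combos all_values out) := by unfold Spec_get_all_combos; infer_instance

-- ===== CLAIM (what is proved, stated in full; the proofs are below) =====
def Claim_equal_get_all_combos : Prop := ∀ (all_values : List (String × List Int)), Dom_get_all_combos all_values → Spec_get_all_combos all_values (get_all_combos all_values)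

-- ===== LEMMAS AND PROOFS =====

-- A on a snoc: pops the appended item, recurses on the prefix
lemma get_all_combos_snoc (xs : List (String × List Int)) (k : String) (vs : List Int) :
    get_all_combos (xs ++ [(k, vs)]) =
      vs.foldl (fun output value =>
        output ++ (get_all_combos xs).map (fun oc => pyDictSet oc k value)) [] := by
  rw [get_all_combos]
  split
  · rename_i h
    rw [List.getLast?_concat] at h
    exact absurd h (by simp)
  · rename_i key values h
    rw [List.getLast?_concat] at h
    simp only [Option.some.injEq, Prod.mk.injEq] at h
    obtain ⟨rfl, rfl⟩ := h
    rw [List.dropLast_concat]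

-- B on a snoc: the fold processes the appended item last
lemma get_all_combos_alt_snoc (xs : List (String × List Int)) (k : String) (vs : List Int) :
    get_all_combos_alt (xs ++ [(k, vs)]) =
      vs.foldl (fun acc value =>
        acc ++ (get_all_combos_alt xs).map (fun c => pyDictSet c k value)) [] := by
  unfold get_all_combos_alt
  rw [List.foldl_append]
  simp only [List.foldl_cons, List.foldl_nil]

lemma get_all_combos_eq (xs : List (String × List Int)) :
    get_all_combos xs = get_all_combos_alt xs := by
  induction xs using List.reverseRecOn with
  | nil => rw [get_all_combos]; rfl
  | append_singleton xs kv ih =>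
      obtain ⟨k, vs⟩ := kv
      rw [get_all_combos_snoc, get_all_combos_alt_snoc, ih]

-- ===== VERDICT (by name: the statement is the Claim_ definition above) =====
theorem get_all_combos_spec : Claim_equal_get_all_combos := by
  intro all_values _
  unfold Spec_get_all_combos
  exact get_all_combos_eq all_values
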